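-- pv_equiv track=rewrite | github.com/atkaiser/ak_immich_scripts | immich_album_people.py | build_person_lookup
-- ===== SOURCE A (Python) =====
-- from typing import Any, Dict, List, Optional, Set, Tuple
--
-- def build_person_lookup(
--     people: List[Dict[str, Any]],
-- ) -> Dict[str, List[str]]:
--     lookup: Dict[str, List[str]] = {}
--     for p in people:
--         name = (p.get("name") or "").strip()
--         pid = p.get("id")
--         if not name or not pid:
--             continue
--         key = name.lower()
--         lookup.setdefault(key, []).append(pid)
--     return lookup
-- ===== SOURCE B (Python) =====
-- def build_person_lookup(people):
--     pairs = []
--     for p in people: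
--         name = (p.get("name") or "").strip()
--         pid = p.get("id")
--         if name and pid:
--             pairs.append((name.lower(), pid))
--     keys = list(dict.fromkeys(k for k, _ in pairs))
--     return {k: [v for k2, v in pairs if k2 == k] for k in keys}
-- ===== Notes on version B (the rewrite author's own statement) =====
-- stated objective: alternative
-- what changed: Replaces the incremental setdefault-append dict build with a two-phase pipeline: one pass collects the valid (lowercased name, id) pairs, then the dict is constructed by mapping each first-occurrence-deduplicated key to a filter of the pair list.
import Mathlib
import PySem

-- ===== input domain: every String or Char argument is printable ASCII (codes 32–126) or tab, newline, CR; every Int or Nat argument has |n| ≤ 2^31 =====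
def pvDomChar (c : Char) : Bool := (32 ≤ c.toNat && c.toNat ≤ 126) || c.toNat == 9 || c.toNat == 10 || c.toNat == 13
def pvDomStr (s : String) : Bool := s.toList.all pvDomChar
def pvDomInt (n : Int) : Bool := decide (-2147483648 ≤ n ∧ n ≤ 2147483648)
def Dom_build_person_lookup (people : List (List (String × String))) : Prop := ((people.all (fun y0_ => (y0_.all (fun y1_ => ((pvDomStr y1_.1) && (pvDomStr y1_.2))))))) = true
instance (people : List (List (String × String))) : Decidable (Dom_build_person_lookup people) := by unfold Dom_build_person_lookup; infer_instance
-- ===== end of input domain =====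

-- B groups by a different decomposition: one pass collecting the valid (lowercased name, id)
-- pairs, then each first-occurrence key is mapped to a filter of that pair list (same result).

-- ===== PORT A =====
-- shared lines of both Pythons: name = (p.get("name") or "").strip();  pid = p.get("id")
def pvName (p : List (String × String)) : String :=
  PySem.Str.strip (((PySem.Dict.ofList p).get? "name").getD "")

def pvPid (p : List (String × String)) : Option String :=
  (PySem.Dict.ofList p).get? "id"

def build_person_lookup (people : List (List (String × String))) : List (String × List String) :=
  (people.foldl (fun (lookup : PySem.Dict String (List String)) p =>
      let name := pvName p
      let pid := pvPid p
      if name = "" ∨ pid = none ∨ pid = some "" then lookup   -- 'continue'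
      else lookup.modify (PySem.Str.lower name) [] (· ++ [pid.getD ""])  -- setdefault(key, []).append(pid)
    ) PySem.Dict.empty).items

-- ===== PORT B =====
def build_person_lookup_alt (people : List (List (String × String))) : List (String × List String) :=
  let pairs := people.foldl (fun (pairs : List (String × String)) p =>
      let name := pvName p
      let pid := pvPid p
      if name ≠ "" ∧ pid ≠ none ∧ pid ≠ some "" then
        pairs ++ [(PySem.Str.lower name, pid.getD "")]
      else pairs
    ) []
  let keys := PySem.List.dedup (pairs.map (·.1))
  keys.map (fun k => (k, (pairs.filter (fun q => q.1 == k)).map (·.2)))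

-- ===== PRECONDITION & SPEC =====
def Spec_build_person_lookup (people : List (List (String × String))) (out : List (String × List String)) : Prop := out = build_person_lookup_alt people
instance (people : List (List (String × String))) (out : List (String × List String)) : Decidable (Spec_build_person_lookup people out) := by unfold Spec_build_person_lookup; infer_instance

-- ===== CLAIM (what is proved, stated in full; the proofs are below) =====
def Claim_equal_build_person_lookup : Prop := ∀ (people : List (List (String × String))), Dom_build_person_lookup people → Spec_build_person_lookup people (build_person_lookup people)

-- ===== LEMMAS AND PROOFS =====

-- the valid-pair projection and guard both programs share
def pvPair (p : List (String × String)) : String × String :=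
  (PySem.Str.lower (pvName p), (pvPid p).getD "")

-- B's first loop is filter-then-map
lemma pairs_eq (people : List (List (String × String))) :
    people.foldl (fun (pairs : List (String × String)) p =>
      let name := pvName p
      let pid := pvPid p
      if name ≠ "" ∧ pid ≠ none ∧ pid ≠ some "" then
        pairs ++ [(PySem.Str.lower name, pid.getD "")]
      else pairs) []
    = (people.filter
        (fun p => decide (pvName p ≠ "" ∧ pvPid p ≠ none ∧ pvPid p ≠ some ""))).map pvPair := by
  show List.foldl (fun (pairs : List (String × String)) p =>
      if pvName p ≠ "" ∧ pvPid p ≠ none ∧ pvPid p ≠ some "" then pairs ++ [pvPair p]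
      else pairs) [] people = _
  rw [PySem.List.foldl_append_ite, List.nil_append]

-- A's loop is the modify-grouping fold over the same filtered list
lemma foldA_eq (people : List (List (String × String))) (d : PySem.Dict String (List String)) :
    people.foldl (fun (lookup : PySem.Dict String (List String)) p =>
      let name := pvName p
      let pid := pvPid p
      if name = "" ∨ pid = none ∨ pid = some "" then lookup
      else lookup.modify (PySem.Str.lower name) [] (· ++ [pid.getD ""])) d
    = ((people.filter
        (fun p => decide (pvName p ≠ "" ∧ pvPid p ≠ none ∧ pvPid p ≠ some ""))).map pvPair).foldl
        (fun d q => d.modify q.1 [] (· ++ [q.2])) d := by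
  induction people generalizing d with
  | nil => rfl
  | cons p rest ih =>
    by_cases h : pvName p ≠ "" ∧ pvPid p ≠ none ∧ pvPid p ≠ some ""
    · have hq : ¬ (pvName p = "" ∨ pvPid p = none ∨ pvPid p = some "") :=
        fun hc => hc.elim h.1 (fun hc' => hc'.elim h.2.1 h.2.2)
      simp only [List.foldl_cons, List.filter_cons, decide_eq_true_eq, if_pos h,
        List.map_cons, if_neg hq]
      exact ih _
    · have hq : pvName p = "" ∨ pvPid p = none ∨ pvPid p = some "" := by
        by_contra hc
        push Not at hc
        exact h ⟨hc.1, hc.2.1, hc.2.2⟩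
      simp only [List.foldl_cons, List.filter_cons, decide_eq_true_eq, if_neg h,
        if_pos hq]
      exact ih d

-- the grouping fold, read back as dedup-keys + per-key filters
lemma group_items (ps : List (String × String)) :
    (ps.foldl (fun (d : PySem.Dict String (List String)) q => d.modify q.1 [] (· ++ [q.2]))
        PySem.Dict.empty).items
    = (PySem.List.dedup (ps.map (·.1))).map
        (fun k => (k, (ps.filter (fun q => q.1 == k)).map (·.2))) := by
  set D := ps.foldl (fun (d : PySem.Dict String (List String)) q => d.modify q.1 [] (· ++ [q.2]))
      PySem.Dict.empty with hD
  have hnd : D.keys.Nodup := by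
    rw [hD]
    exact PySem.Dict.nodup_keys_foldl_modify_key ps (·.1) [] (fun _ q => (· ++ [q.2])) _
      PySem.Dict.nodup_keys_empty
  have hkeys : D.keys = PySem.List.dedup (ps.map (·.1)) := by
    rw [hD, PySem.Dict.keys_foldl_modify_key, PySem.List.dedup_eq_ofList]
    simp [PySem.Set.update, PySem.Set.ofList_eq_foldl, PySem.Dict.keys_empty]
  have hgetD : ∀ k, D.getD k [] = (ps.filter (fun q => q.1 == k)).map (·.2) := by
    intro k
    rw [hD, PySem.Dict.getD_foldl_modify_append, PySem.Dict.getD_empty, List.nil_append]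
  rw [PySem.Dict.items_eq_map_keys D hnd [], hkeys]
  exact List.map_congr_left (fun k _ => by rw [hgetD k])

-- ===== VERDICT (by name: the statement is the Claim_ definition above) =====
theorem build_person_lookup_spec : Claim_equal_build_person_lookup := by
  intro people _
  show build_person_lookup people = build_person_lookup_alt people
  unfold build_person_lookup build_person_lookup_alt
  simp only [pairs_eq, foldA_eq, group_items]
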